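-- pv_equiv track=rewrite | github.com/mohanganesh3/ship | training/phase2_optionc_common.py | bucket_records_by_domain
-- ===== SOURCE A (Python) =====
-- def normalize_space(text: str | None) -> str:
--     return " ".join(str(text or "").split()).strip()
--
-- def coalesce_question(record: dict) -> str:
--     return normalize_space(record.get("q") or record.get("question") or record.get("prompt"))
--
-- def question_sort_key(record: dict) -> str:
--     return f"{normalize_space(record.get('domain_letter'))}\t{normalize_space(record.get('subtopic_id'))}\t{coalesce_question(record).lower()}"
--
-- def bucket_records_by_domain(records: list[dict]) -> dict[str, list[dict]]:
--     buckets: dict[str, list[dict]] = {}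
--     for record in records:
--         domain = normalize_space(record.get("domain_letter") or "UNK")
--         buckets.setdefault(domain, []).append(record)
--     for key in buckets:
--         buckets[key] = sorted(buckets[key], key=question_sort_key)
--     return buckets
-- ===== SOURCE B (Python) =====
-- def normalize_space(text: str | None) -> str:
--     return " ".join(str(text or "").split()).strip()
--
-- def coalesce_question(record: dict) -> str:
--     return normalize_space(record.get("q") or record.get("question") or record.get("prompt"))
--
-- def question_sort_key(record: dict) -> str:
--     return f"{normalize_space(record.get('domain_letter'))}\t{normalize_space(record.get('subtopic_id'))}\t{coalesce_question(record).lower()}"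
--
-- def _insert_sorted(bucket: list, key: str, record: dict) -> None:
--     i = 0
--     while i < len(bucket) and not key < question_sort_key(bucket[i]):
--         i += 1
--     bucket.insert(i, record)
--
-- def bucket_records_by_domain(records: list[dict]) -> dict[str, list[dict]]:
--     buckets: dict[str, list[dict]] = {}
--     for record in records:
--         domain = normalize_space(record.get("domain_letter") or "UNK")
--         _insert_sorted(buckets.setdefault(domain, []), question_sort_key(record), record)
--     return buckets
-- ===== Notes on version B (the rewrite author's own statement) =====
-- stated objective: alternative
-- what changed: A appends each record to its domain bucket and then sorts every bucket in a second pass; B makes a single pass that inserts each record directly at its sorted position in the bucket, so no final sorting pass is needed.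
import Mathlib
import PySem

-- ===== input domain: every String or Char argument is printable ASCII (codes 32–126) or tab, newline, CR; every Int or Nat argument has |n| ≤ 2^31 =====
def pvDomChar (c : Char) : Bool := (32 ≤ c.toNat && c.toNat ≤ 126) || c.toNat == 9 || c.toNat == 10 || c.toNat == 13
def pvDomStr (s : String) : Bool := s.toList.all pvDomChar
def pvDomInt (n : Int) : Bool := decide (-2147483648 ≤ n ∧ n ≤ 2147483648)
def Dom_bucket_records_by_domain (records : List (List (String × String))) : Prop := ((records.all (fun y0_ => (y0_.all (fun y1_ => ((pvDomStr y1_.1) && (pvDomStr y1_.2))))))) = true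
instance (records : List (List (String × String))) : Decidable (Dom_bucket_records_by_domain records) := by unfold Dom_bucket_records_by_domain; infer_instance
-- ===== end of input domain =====

-- B replaces A's two-phase "append to buckets, then sort every bucket" by a single pass that
-- keeps each bucket sorted as records arrive (ordered insertion); same results, alternative algorithm.

-- ===== shared helpers (the Python module's helper functions, used verbatim by A and B) =====
-- record.get(k) on an association-list record: first match
def recGet (r : List (String × String)) (k : String) : Option String :=
  (r.find? (fun p => p.1 == k)).map (·.2)

-- Python `a or b` on optional strings: falsy = None or ""
def orS (a b : Option String) : Option String :=
  match a with
  | some s => if s = "" then b else some s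
  | none => b

-- normalize_space(text): " ".join(str(text or "").split()).strip()
def normalize_space (t : Option String) : String :=
  PySem.Str.strip (PySem.Str.join " " (PySem.Str.split₀ (t.getD "")))

-- coalesce_question(record)
def coalesce_question (r : List (String × String)) : String :=
  normalize_space (orS (recGet r "q") (orS (recGet r "question") (recGet r "prompt")))

-- question_sort_key(record): f"{ns(domain_letter)}\t{ns(subtopic_id)}\t{coalesce_question.lower()}"
def question_sort_key (r : List (String × String)) : String :=
  normalize_space (recGet r "domain_letter") ++ "\t" ++ normalize_space (recGet r "subtopic_id")
    ++ "\t" ++ PySem.Str.lower (coalesce_question r)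

-- normalize_space(record.get("domain_letter") or "UNK")
def domKey (r : List (String × String)) : String :=
  normalize_space (orS (recGet r "domain_letter") (some "UNK"))

-- ===== PORT A =====
def bucket_records_by_domain (records : List (List (String × String))) : List (String × List (List (String × String))) :=
  -- first loop: buckets.setdefault(domain, []).append(record)
  let buckets := records.foldl
    (fun d r =>
      let dom := domKey r
      d.insert dom (d.getD dom [] ++ [r]))
    (PySem.Dict.empty : PySem.Dict String (List (List (String × String))))
  -- second loop: for key in buckets: buckets[key] = sorted(buckets[key], key=question_sort_key)
  (buckets.items.map (fun p => (p.1, PySem.List.sorted p.2 question_sort_key false)))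

-- ===== PORT B =====
-- _insert_sorted: insert record before the first bucket element whose key is strictly greater
def insOrd (key : String) (r : List (String × String)) :
    List (List (String × String)) → List (List (String × String))
  | [] => [r]
  | x :: xs => if key < question_sort_key x then r :: x :: xs else x :: insOrd key r xs

def bucket_records_by_domain_alt (records : List (List (String × String))) : List (String × List (List (String × String))) :=
  (records.foldl
    (fun d r =>
      let dom := domKey r
      d.insert dom (insOrd (question_sort_key r) r (d.getD dom [])))
    (PySem.Dict.empty : PySem.Dict String (List (List (String × String))))).items

-- ===== PRECONDITION & SPEC =====
def Spec_bucket_records_by_domain (records : List (List (String × String))) (out : List (String × List (List (String × String)))) : Prop := out = bucket_records_by_domain_alt records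
instance (records : List (List (String × String))) (out : List (String × List (List (String × String)))) : Decidable (Spec_bucket_records_by_domain records out) := by unfold Spec_bucket_records_by_domain; infer_instance

-- ===== CLAIM (what is proved, stated in full; the proofs are below) =====
def Claim_equal_bucket_records_by_domain : Prop := ∀ (records : List (List (String × String))), Dom_bucket_records_by_domain records → Spec_bucket_records_by_domain records (bucket_records_by_domain records)

-- ===== LEMMAS AND PROOFS =====

-- sort a bucket with A's key
def msortB (v : List (List (String × String))) : List (List (String × String)) :=
  PySem.List.sorted v question_sort_key false

-- sort every value of the bucket dict
def mapSortD (d : PySem.Dict String (List (List (String × String)))) :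
    PySem.Dict String (List (List (String × String))) :=
  ⟨d.items.map (fun p => (p.1, msortB p.2))⟩

theorem insOrd_eq_insertBy (r : List (String × String)) (ys : List (List (String × String))) :
    insOrd (question_sort_key r) r ys
      = PySem.List.insertBy (fun a b => decide (question_sort_key a < question_sort_key b)) r ys := by
  induction ys with
  | nil => simp [insOrd, PySem.List.insertBy]
  | cons x xs ih =>
    simp only [insOrd, PySem.List.insertBy, ih]
    by_cases h : question_sort_key r < question_sort_key x <;> simp [h]

theorem msortB_append_one (v : List (List (String × String))) (r : List (String × String)) :
    msortB (v ++ [r]) = insOrd (question_sort_key r) r (msortB v) := by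
  simp only [msortB, PySem.List.sorted_eq_foldl_insertBy, List.foldl_append, List.foldl_cons,
    List.foldl_nil, insOrd_eq_insertBy]

theorem contains_mapSortD (d : PySem.Dict String (List (List (String × String)))) (k : String) :
    (mapSortD d).contains k = d.contains k := by
  simp [mapSortD, PySem.Dict.contains, Function.comp_def]

theorem getD_mapSortD (d : PySem.Dict String (List (List (String × String)))) (k : String) :
    (mapSortD d).getD k [] = msortB (d.getD k []) := by
  simp only [mapSortD, PySem.Dict.getD, PySem.Dict.get?, List.find?_map, Function.comp_def]
  cases h : d.items.find? (fun p => p.1 == k) <;> simp [msortB, PySem.List.sorted]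

theorem mapSortD_insert (d : PySem.Dict String (List (List (String × String)))) (k : String)
    (v : List (List (String × String))) :
    mapSortD (d.insert k v) = (mapSortD d).insert k (msortB v) := by
  simp only [PySem.Dict.insert, contains_mapSortD]
  by_cases h : d.contains k = true <;> simp only [h, if_true]
  · apply PySem.Dict.ext
    simp only [mapSortD, List.map_map]
    apply List.map_congr_left
    intro p _
    rcases eq_or_ne p.1 k with hp | hp <;> simp [hp]
  · apply PySem.Dict.ext
    simp [mapSortD]

theorem fold_invariant (records : List (List (String × String)))
    (d : PySem.Dict String (List (List (String × String)))) :
    mapSortD (records.foldl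
        (fun d r => let dom := domKey r; d.insert dom (d.getD dom [] ++ [r])) d)
      = records.foldl
          (fun d r => let dom := domKey r; d.insert dom (insOrd (question_sort_key r) r (d.getD dom []))) (mapSortD d) := by
  induction records generalizing d with
  | nil => rfl
  | cons r rs ih =>
    simp only [List.foldl_cons]
    rw [ih]
    congr 1
    rw [mapSortD_insert, msortB_append_one, getD_mapSortD]

-- ===== VERDICT (by name: the statement is the Claim_ definition above) =====
theorem bucket_records_by_domain_spec : Claim_equal_bucket_records_by_domain := by
  intro records _
  unfold Spec_bucket_records_by_domain bucket_records_by_domain bucket_records_by_domain_alt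
  have h := fold_invariant records PySem.Dict.empty
  have he : mapSortD PySem.Dict.empty = PySem.Dict.empty := rfl
  rw [he] at h
  rw [← h]
  rfl
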